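-- pv_equiv track=rewrite | github.com/Pasindu19970808/Frequent-Pattern-Tree | FrequencyPatternTree.py | remove_items_below_sup
-- ===== SOURCE A (Python) =====
-- from collections import Counter, defaultdict
--
-- def remove_items_below_sup(transaction_dict,support):
--     count = Counter()
--     for transaction in transaction_dict:
--         count.update(transaction_dict[transaction])
--     final_counts = {i[0]:i[1] for i in sorted(count.items(), key = lambda x: x[1],reverse=True) if i[1] >= support}
--     #this allows to ensure a consistent order of sorted items, even if 2 or more items have the same support
--     final_counts_idx_order = dict(zip(final_counts.keys(),range(len(final_counts.keys()))))
--     for transaction in transaction_dict: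
--         transaction_dict[transaction] = sorted([i for i in transaction_dict[transaction] if (i in final_counts.keys())],key = lambda x: final_counts_idx_order[x])
--     return transaction_dict,final_counts
-- ===== SOURCE B (Python) =====
-- from collections import Counter
--
-- def remove_items_below_sup(transaction_dict, support):
--     totals = Counter()
--     for items in transaction_dict.values():
--         totals.update(items)
--     final_counts = {k: v for k, v in sorted(totals.items(), key=lambda x: x[1], reverse=True) if v >= support}
--     for t, items in transaction_dict.items():
--         tc = Counter(items)
--         transaction_dict[t] = [k for k in final_counts for _ in range(tc[k])]
--     return transaction_dict, final_counts
-- ===== Notes on version B (the rewrite author's own statement) =====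
-- stated objective: simpler
-- what changed: B drops A's zip-with-range index dictionary and the per-transaction stable sort entirely: it rebuilds each transaction in one pass over the frequency-ordered surviving items, emitting each item once per occurrence (counted by a per-transaction Counter), instead of filtering and sorting each transaction by a looked-up index.
import Mathlib
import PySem

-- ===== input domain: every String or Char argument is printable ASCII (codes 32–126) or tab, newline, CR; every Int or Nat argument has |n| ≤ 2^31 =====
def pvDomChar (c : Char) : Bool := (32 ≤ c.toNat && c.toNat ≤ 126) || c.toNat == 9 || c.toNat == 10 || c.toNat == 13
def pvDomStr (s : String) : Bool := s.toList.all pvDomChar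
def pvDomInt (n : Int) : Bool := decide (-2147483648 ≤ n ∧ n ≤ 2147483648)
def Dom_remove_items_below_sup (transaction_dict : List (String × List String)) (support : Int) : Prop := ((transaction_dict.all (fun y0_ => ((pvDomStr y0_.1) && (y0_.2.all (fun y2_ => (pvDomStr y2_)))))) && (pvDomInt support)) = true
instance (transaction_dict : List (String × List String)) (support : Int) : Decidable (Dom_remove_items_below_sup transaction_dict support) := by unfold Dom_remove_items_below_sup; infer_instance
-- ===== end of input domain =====

-- B drops A's index dictionary and per-transaction sort: it rebuilds each transaction by walking the
-- frequency-ordered item list once, emitting each surviving item as often as it occurs.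
-- A mutates its dict argument in place (values replaced); the equivalence proved here is about the return value.

-- ===== PORT A =====
def remove_items_below_sup (transaction_dict : List (String × List String)) (support : Int) : (List (String × List String)) × (List (String × Int)) :=
  -- count = Counter(); for transaction in transaction_dict: count.update(transaction_dict[transaction])
  let count : PySem.Dict String Int :=
    (transaction_dict.map Prod.fst).foldl
      (fun c t => ((PySem.Dict.mk transaction_dict).getD t []).foldl
        (fun c i => c.modify i 0 (· + 1)) c)
      PySem.Dict.empty
  -- final_counts = {i[0]: i[1] for i in sorted(count.items(), key=lambda x: x[1], reverse=True) if i[1] >= support}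
  let final_counts : PySem.Dict String Int :=
    PySem.Dict.ofList
      (((PySem.List.sorted count.items (fun x => x.2) true).filter
        (fun i => support ≤ i.2)).map (fun i => (i.1, i.2)))
  -- final_counts_idx_order = dict(zip(final_counts.keys(), range(len(final_counts.keys()))))
  let idx : PySem.Dict String Int :=
    PySem.Dict.ofList (final_counts.keys.zip (PySem.List.pyRange 0 (final_counts.keys.length : Int) 1))
  -- for transaction in transaction_dict: transaction_dict[transaction] = sorted([...], key=...)
  -- (the idx lookup's default 0 is never used: every item surviving the filter is a key of idx)
  let d2 : PySem.Dict String (List String) :=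
    (transaction_dict.map Prod.fst).foldl
      (fun d t => d.insert t
        (PySem.List.sorted ((d.getD t []).filter (fun i => final_counts.contains i))
          (fun x => idx.getD x 0) false))
      (PySem.Dict.mk transaction_dict)
  (d2.items, final_counts.items)

-- ===== PORT B =====
def remove_items_below_sup_alt (transaction_dict : List (String × List String)) (support : Int) : (List (String × List String)) × (List (String × Int)) :=
  -- totals = Counter(); for items in transaction_dict.values(): totals.update(items)
  let totals : PySem.Dict String Int :=
    transaction_dict.foldl (fun c kv => kv.2.foldl (fun c i => c.modify i 0 (· + 1)) c)
      PySem.Dict.empty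
  -- final_counts = {k: v for k, v in sorted(totals.items(), key=lambda x: x[1], reverse=True) if v >= support}
  let final_counts : PySem.Dict String Int :=
    PySem.Dict.ofList ((PySem.List.sorted totals.items (fun x => x.2) true).filter
      (fun i => support ≤ i.2))
  -- for t, items in transaction_dict.items(): transaction_dict[t] = [k for k in final_counts for _ in range(Counter(items)[k])]
  let newtd : List (String × List String) :=
    transaction_dict.map (fun kv =>
      (kv.1, final_counts.keys.flatMap
        (fun k => List.replicate ((PySem.Dict.counter kv.2).getD k 0).toNat k)))
  (newtd, final_counts.items)

-- ===== PRECONDITION & SPEC =====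
-- Pre_ only asks that the association list really encodes a Python dict (distinct keys); a Python
-- dict cannot carry duplicate keys, so no input A accepts is excluded.
def Pre_remove_items_below_sup (transaction_dict : List (String × List String)) (support : Int) : Prop :=
  (transaction_dict.map Prod.fst).Nodup
instance (transaction_dict : List (String × List String)) (support : Int) : Decidable (Pre_remove_items_below_sup transaction_dict support) := by unfold Pre_remove_items_below_sup; infer_instance

def pvWitness_remove_items_below_sup : (List (String × List String)) × Int :=
  ([("t1", ["a", "b", "a"]), ("t2", ["b"])], 1)

def Spec_remove_items_below_sup (transaction_dict : List (String × List String)) (support : Int) (out : (List (String × List String)) × (List (String × Int))) : Prop := out = remove_items_below_sup_alt transaction_dict support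
instance (transaction_dict : List (String × List String)) (support : Int) (out : (List (String × List String)) × (List (String × Int))) : Decidable (Spec_remove_items_below_sup transaction_dict support out) := by unfold Spec_remove_items_below_sup; infer_instance

-- ===== CLAIM (what is proved, stated in full; the proofs are below) =====
def Claim_equal_remove_items_below_sup : Prop := ∀ (transaction_dict : List (String × List String)) (support : Int), Dom_remove_items_below_sup transaction_dict support → Pre_remove_items_below_sup transaction_dict support → Spec_remove_items_below_sup transaction_dict support (remove_items_below_sup transaction_dict support)

-- ===== LEMMAS AND PROOFS =====

-- A's counting loop looks each key up in the dict it iterates; with distinct keys that lookup is the pair's own value.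
theorem pv_count_eq (td : List (String × List String))
    (h : (td.map Prod.fst).Nodup) :
    (td.map Prod.fst).foldl
      (fun c t => ((PySem.Dict.mk td).getD t []).foldl
        (fun c i => c.modify i 0 (· + 1)) c) (PySem.Dict.empty : PySem.Dict String Int)
    = td.foldl (fun c kv => kv.2.foldl (fun c i => c.modify i 0 (· + 1)) c) (PySem.Dict.empty : PySem.Dict String Int) := by
  rw [List.foldl_map]
  apply PySem.List.foldl_congr_mem
  intro acc kv hkv
  have : (PySem.Dict.mk td).getD kv.1 [] = kv.2 :=
    PySem.Dict.getD_of_mem_items (PySem.Dict.mk td) (k := kv.1) (v := kv.2) hkv h []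
  rw [this]

-- A's mutation loop over the keys of a distinct-key dict replaces each value once, in place.
theorem pv_loop_eq (g : List String → List String) :
    ∀ (suf front : List (String × List String)),
    ((front ++ suf).map Prod.fst).Nodup →
    (List.foldl (fun d kv => d.insert kv.1 (g (d.getD kv.1 [])))
      (PySem.Dict.mk (front ++ suf)) suf).items
    = front ++ suf.map (fun kv => (kv.1, g kv.2)) := by
  intro suf
  induction suf with
  | nil => intro front h; simp
  | cons kv suf ih =>
    intro front h
    have hk1 : kv.1 ∉ front.map Prod.fst ∧ kv.1 ∉ suf.map Prod.fst := by
      rw [List.map_append, List.map_cons, List.nodup_append] at h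
      obtain ⟨h1, h2, h3⟩ := h
      exact ⟨fun hm => h3 kv.1 hm kv.1 (by simp) rfl, (List.nodup_cons.mp h2).1⟩
    have hget : (PySem.Dict.mk (front ++ kv :: suf)).getD kv.1 [] = kv.2 := by
      apply PySem.Dict.getD_of_mem_items _ (by simp) h
    have hcont : (PySem.Dict.mk (front ++ kv :: suf)).contains kv.1 = true := by
      rw [PySem.Dict.contains_iff_mem_keys]; simp [PySem.Dict.keys]
    have hins : ((PySem.Dict.mk (front ++ kv :: suf)).insert kv.1 (g kv.2)).items
        = front ++ (kv.1, g kv.2) :: suf := by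
      rw [PySem.Dict.items_insert_of_contains _ _ hcont]
      show (front ++ kv :: suf).map _ = _
      rw [List.map_append, List.map_cons]
      have hf : List.map (fun p => if (p.1 == kv.1) = true then (kv.1, g kv.2) else p) front
          = front := by
        calc List.map (fun p => if (p.1 == kv.1) = true then (kv.1, g kv.2) else p) front
            = List.map id front := List.map_congr_left (fun p hp => by
              have : p.1 ≠ kv.1 := fun he => hk1.1 (he ▸ List.mem_map_of_mem hp)
              simp [this])
          _ = front := List.map_id front
      have hs : List.map (fun p => if (p.1 == kv.1) = true then (kv.1, g kv.2) else p) suf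
          = suf := by
        calc List.map (fun p => if (p.1 == kv.1) = true then (kv.1, g kv.2) else p) suf
            = List.map id suf := List.map_congr_left (fun p hp => by
              have : p.1 ≠ kv.1 := fun he => hk1.2 (he ▸ List.mem_map_of_mem hp)
              simp [this])
          _ = suf := List.map_id suf
      rw [hf, hs]; simp
    simp only [List.foldl_cons, hget]
    have hd : (PySem.Dict.mk (front ++ kv :: suf)).insert kv.1 (g kv.2)
        = PySem.Dict.mk (front ++ [(kv.1, g kv.2)] ++ suf) := by
      apply PySem.Dict.ext; rw [hins]; simp
    rw [hd]
    have := ih (front ++ [(kv.1, g kv.2)]) (by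
      have he : ((front ++ [(kv.1, g kv.2)]) ++ suf).map Prod.fst
          = (front ++ kv :: suf).map Prod.fst := by simp
      rw [he]; exact h)
    rw [this]; simp

-- the zip-with-range dictionary maps the i-th key to i
theorem pv_idx_getD (ks : List String) (h : ks.Nodup) (i : Nat) (hi : i < ks.length) :
    (PySem.Dict.ofList (ks.zip (PySem.List.pyRange 0 (ks.length : Int) 1))).getD ks[i] 0 = (i : Int) := by
  have hlen : (PySem.List.pyRange 0 (ks.length : Int) 1).length = ks.length := by
    rw [PySem.List.length_pyRange_one]; simp
  have hfst : (ks.zip (PySem.List.pyRange 0 (ks.length : Int) 1)).map Prod.fst = ks :=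
    List.map_fst_zip (by rw [hlen])
  have hmem : (ks[i], (i : Int)) ∈ ks.zip (PySem.List.pyRange 0 (ks.length : Int) 1) := by
    have : (ks.zip (PySem.List.pyRange 0 (ks.length : Int) 1))[i]'(by
        rw [List.length_zip, hlen]; omega) = (ks[i], (i : Int)) := by
      rw [List.getElem_zip]
      congr 1
      rw [PySem.List.getElem_pyRange_one]; simp
    exact this ▸ List.getElem_mem _
  have hkeys : (PySem.Dict.ofList (ks.zip (PySem.List.pyRange 0 (ks.length : Int) 1))).keys.Nodup :=
    PySem.Dict.nodup_keys_ofList _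
  have hitems : (PySem.Dict.ofList (ks.zip (PySem.List.pyRange 0 (ks.length : Int) 1))).items
      = ks.zip (PySem.List.pyRange 0 (ks.length : Int) 1) := by
    have := PySem.Dict.items_foldl_insert_fresh
      (l := ks.zip (PySem.List.pyRange 0 (ks.length : Int) 1))
      (k := Prod.fst) (v := Prod.snd) (d := PySem.Dict.empty)
      (by intro a _; rfl) (by rw [hfst]; exact h)
    simpa [PySem.Dict.ofList] using this
  exact PySem.Dict.getD_of_mem_items _ (by rw [hitems]; exact hmem) hkeys 0

-- two key-sorted permutations of each other whose members have distinct keys are equal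
theorem pv_eq_of_sorted_pair {α : Type} (key : α → Int) :
    ∀ (l₁ l₂ : List α), l₁.Perm l₂ →
    l₁.Pairwise (fun a b => key a ≤ key b) → l₂.Pairwise (fun a b => key a ≤ key b) →
    (∀ a ∈ l₁, ∀ b ∈ l₁, key a = key b → a = b) → l₁ = l₂ := by
  intro l₁
  induction l₁ with
  | nil => intro l₂ hp _ _ _; exact (List.Perm.nil_eq hp).symm ▸ rfl
  | cons a t ih =>
    intro l₂ hp h1 h2 hinj
    cases l₂ with
    | nil => exact absurd hp.symm (by simp)
    | cons b t₂ =>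
      have hab : a = b := by
        have hmem : a ∈ b :: t₂ := hp.mem_iff.mp (by simp)
        rcases List.mem_cons.mp hmem with h | h
        · exact h
        · have hba : key b ≤ key a := (List.pairwise_cons.mp h2).1 a h
          have hmb : b ∈ a :: t := hp.symm.mem_iff.mp (by simp)
          have hkey : key a = key b := by
            rcases List.mem_cons.mp hmb with h' | h'
            · exact congrArg key h'.symm
            · exact le_antisymm ((List.pairwise_cons.mp h1).1 b h') hba
          exact hinj a (by simp) b hmb hkey
      subst hab
      have hpt : t.Perm t₂ := hp.cons_inv
      have := ih t₂ hpt (List.pairwise_cons.mp h1).2 (List.pairwise_cons.mp h2).2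
        (fun x hx y hy h => hinj x (by simp [hx]) y (by simp [hy]) h)
      rw [this]

theorem pv_count_flatMap_replicate (n : String → Nat) (x : String) :
    ∀ (ks : List String), ks.Nodup →
    (ks.flatMap (fun k => List.replicate (n k) k)).count x = if x ∈ ks then n x else 0 := by
  intro ks
  induction ks with
  | nil => intro _; simp
  | cons k t ih =>
    intro h
    rw [List.flatMap_cons, List.count_append, List.count_replicate, ih (List.nodup_cons.mp h).2]
    by_cases hx : x = k
    · subst hx
      have : x ∉ t := (List.nodup_cons.mp h).1
      simp [this]
    · simp [hx, List.mem_cons]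
      intro h'; exact absurd h'.symm hx

theorem pv_pairwise_flatMap_replicate {key : String → Int} (n : String → Nat) :
    ∀ (ks : List String), ks.Pairwise (fun a b => key a < key b) →
    (ks.flatMap (fun k => List.replicate (n k) k)).Pairwise (fun a b => key a ≤ key b) := by
  intro ks
  induction ks with
  | nil => intro _; simp
  | cons k t ih =>
    intro h
    rw [List.flatMap_cons, List.pairwise_append]
    refine ⟨List.pairwise_replicate.mpr (by simp), ih (List.pairwise_cons.mp h).2, ?_⟩
    intro a ha b hb
    have ha' : a = k := List.eq_of_mem_replicate ha
    obtain ⟨k', hk', hb'⟩ := List.mem_flatMap.mp hb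
    have hb2 : b = k' := List.eq_of_mem_replicate hb'
    rw [ha', hb2]
    exact le_of_lt ((List.pairwise_cons.mp h).1 k' hk')

-- the value each transaction is rewritten to: A's filter-and-stable-sort equals B's ordered emission
theorem pv_value_eq (fc : PySem.Dict String Int) (hnd : fc.keys.Nodup) (v : List String) :
    PySem.List.sorted (v.filter (fun i => fc.contains i))
      (fun x => (PySem.Dict.ofList (fc.keys.zip (PySem.List.pyRange 0 (fc.keys.length : Int) 1))).getD x 0) false
    = fc.keys.flatMap (fun k => List.replicate ((PySem.Dict.counter v).getD k 0).toNat k) := by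
  simp only [PySem.Dict.getD_counter, Int.toNat_natCast]
  set ks := fc.keys with hks
  set key : String → Int := fun x => (PySem.Dict.ofList (ks.zip (PySem.List.pyRange 0 (ks.length : Int) 1))).getD x 0 with hkeydef
  have hkey : ∀ (i : Nat) (hi : i < ks.length), key ks[i] = (i : Int) := fun i hi => pv_idx_getD ks hnd i hi
  have hinjks : ∀ a ∈ ks, ∀ b ∈ ks, key a = key b → a = b := by
    intro a ha b hb hk
    obtain ⟨i, hi, rfl⟩ := List.mem_iff_getElem.mp ha
    obtain ⟨j, hj, rfl⟩ := List.mem_iff_getElem.mp hb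
    rw [hkey i hi, hkey j hj] at hk
    have : i = j := by exact_mod_cast hk
    subst this; rfl
  have hstrict : ks.Pairwise (fun a b => key a < key b) := by
    rw [List.pairwise_iff_getElem]
    intro i j hi hj hij
    rw [hkey i hi, hkey j hj]
    exact_mod_cast hij
  have hmemfilter : ∀ x ∈ v.filter (fun i => fc.contains i), x ∈ ks := by
    intro x hx
    have := (List.mem_filter.mp hx).2
    rw [PySem.Dict.contains_iff_mem_keys] at this
    exact this
  apply pv_eq_of_sorted_pair key
  · -- perm
    apply (PySem.List.sorted_perm _ _ _).trans
    rw [List.perm_iff_count]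
    intro x
    rw [pv_count_flatMap_replicate _ x ks hnd]
    by_cases hx : x ∈ ks
    · have hc : fc.contains x = true := by rw [PySem.Dict.contains_iff_mem_keys]; exact hx
      rw [if_pos hx, List.count_filter hc]
    · have hc : fc.contains x ≠ true := by
        intro h; apply hx; rw [PySem.Dict.contains_iff_mem_keys] at h; exact h
      rw [if_neg hx, List.count_eq_zero]
      intro hmem; exact hc (List.mem_filter.mp hmem).2
  · exact PySem.List.sorted_pairwise _ _
  · exact pv_pairwise_flatMap_replicate _ ks hstrict
  · intro a ha b hb hk
    rw [PySem.List.mem_sorted] at ha hb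
    exact hinjks a (hmemfilter a ha) b (hmemfilter b hb) hk

-- ===== VERDICT (by name: the statement is the Claim_ definition above) =====
theorem remove_items_below_sup_spec : Claim_equal_remove_items_below_sup := by
  intro td support hdom hpre
  unfold Spec_remove_items_below_sup
  unfold remove_items_below_sup remove_items_below_sup_alt
  simp only []
  rw [pv_count_eq td hpre]
  simp only [Prod.mk.eta, List.map_id']
  set FC := PySem.Dict.ofList ((PySem.List.sorted (td.foldl (fun c kv => kv.2.foldl (fun c i => c.modify i 0 (· + 1)) c) (PySem.Dict.empty : PySem.Dict String Int)).items (fun x => x.2) true).filter (fun i => decide (support ≤ i.2))) with hFC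
  set IDX := PySem.Dict.ofList (FC.keys.zip (PySem.List.pyRange 0 (FC.keys.length : Int) 1)) with hIDX
  simp only [Prod.mk.injEq]
  refine ⟨?_, trivial⟩
  rw [List.foldl_map]
  have hnd : FC.keys.Nodup := PySem.Dict.nodup_keys_ofList _
  have hl := pv_loop_eq (fun v => PySem.List.sorted (v.filter (fun i => FC.contains i))
      (fun x => IDX.getD x 0) false) td [] (by simpa using hpre)
  simp only [List.nil_append] at hl
  refine hl.trans (List.map_congr_left ?_)
  intro kv hkv
  rw [hIDX]
  exact congrArg (fun l => (kv.1, l)) (pv_value_eq FC hnd kv.2)
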